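-- pv_equiv track=rewrite | github.com/KanonKongen4/KingDomino | PointsCounter.py | GetCrownsForEachTerritory
-- ===== SOURCE A (Python) =====
-- def GetCrownsForEachTerritory(differentNamesList, territoryMatrix, crownMatrix):
--     listOfCrownValues = []
--     for name in differentNamesList:
--         crownCount = 0
--         for i, y in enumerate(territoryMatrix):
--             for j, x in enumerate(y):
--                 if x == name:
--                     if(crownMatrix[i][j] != 0):
--                         crownCount += crownMatrix[i][j]
--
--         listOfCrownValues.append(crownCount)
--     return listOfCrownValues
-- ===== SOURCE B (Python) =====
-- def GetCrownsForEachTerritory(differentNamesList, territoryMatrix, crownMatrix):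
--     sums = {}
--     for tRow, cRow in zip(territoryMatrix, crownMatrix):
--         for t, c in zip(tRow, cRow):
--             sums[t] = sums.get(t, 0) + c
--     return [sums.get(name, 0) for name in differentNamesList]
-- ===== Notes on version B (the rewrite author's own statement) =====
-- stated objective: faster
-- what changed: Replaces the per-name rescan of the whole matrix by a single pass that accumulates crown sums into a dict keyed by territory value, then one lookup per name.
import Mathlib
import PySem

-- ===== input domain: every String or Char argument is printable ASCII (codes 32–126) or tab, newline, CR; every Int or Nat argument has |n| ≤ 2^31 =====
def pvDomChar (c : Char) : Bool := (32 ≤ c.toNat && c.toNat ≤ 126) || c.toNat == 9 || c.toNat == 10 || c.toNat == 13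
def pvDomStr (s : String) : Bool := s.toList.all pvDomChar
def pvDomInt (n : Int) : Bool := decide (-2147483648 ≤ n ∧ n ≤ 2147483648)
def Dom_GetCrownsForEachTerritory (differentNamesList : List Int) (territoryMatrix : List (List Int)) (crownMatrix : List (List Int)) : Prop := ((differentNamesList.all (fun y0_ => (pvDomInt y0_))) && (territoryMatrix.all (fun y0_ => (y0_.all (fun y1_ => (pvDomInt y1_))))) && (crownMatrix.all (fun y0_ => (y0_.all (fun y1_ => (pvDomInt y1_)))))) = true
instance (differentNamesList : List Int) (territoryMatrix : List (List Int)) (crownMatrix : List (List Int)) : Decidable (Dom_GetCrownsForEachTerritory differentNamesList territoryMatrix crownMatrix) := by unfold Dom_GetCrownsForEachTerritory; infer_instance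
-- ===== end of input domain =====

-- B replaces A's per-name rescan of the matrix by one dict-building pass plus one lookup per name (asymptotically faster).

-- ===== PORT A =====
-- literal transliteration of A: for each name, scan every cell with enumerate and
-- index crownMatrix[i][j] (pyGet? none = IndexError, excluded by Pre_)
def GetCrownsForEachTerritory (differentNamesList : List Int) (territoryMatrix : List (List Int)) (crownMatrix : List (List Int)) : List Int :=
  differentNamesList.foldl (fun listOfCrownValues name =>
    let crownCount : Int :=
      (PySem.List.enumerate territoryMatrix 0).foldl (fun cc iy =>
        (PySem.List.enumerate iy.2 0).foldl (fun cc jx =>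
          if jx.2 = name then
            match PySem.List.pyGet? crownMatrix iy.1 with
            | some row =>
              match PySem.List.pyGet? row jx.1 with
              | some v => if v ≠ 0 then cc + v else cc
              | none => cc          -- IndexError in Python; outside Pre_
            | none => cc            -- IndexError in Python; outside Pre_
          else cc) cc) 0
    listOfCrownValues ++ [crownCount]) []

-- ===== PORT B =====
def GetCrownsForEachTerritory_alt (differentNamesList : List Int) (territoryMatrix : List (List Int)) (crownMatrix : List (List Int)) : List Int :=
  let sums : PySem.Dict Int Int :=
    (territoryMatrix.zip crownMatrix).foldl (fun d rr =>
      (rr.1.zip rr.2).foldl (fun d p => d.insert p.1 (d.getD p.1 0 + p.2)) d)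
      PySem.Dict.empty
  differentNamesList.map (fun name => sums.getD name 0)

-- ===== PRECONDITION & SPEC =====
-- Pre_ = exactly the inputs on which A returns: every territory cell whose value occurs in
-- differentNamesList has an in-range crownMatrix cell (else A's crownMatrix[i][j] raises IndexError).
def Pre_GetCrownsForEachTerritory (differentNamesList : List Int) (territoryMatrix : List (List Int)) (crownMatrix : List (List Int)) : Prop :=
  ∀ i : Fin territoryMatrix.length, ∀ j : Fin (territoryMatrix.get i).length,
    (territoryMatrix.get i).get j ∈ differentNamesList →
      (i : Nat) < crownMatrix.length ∧ (j : Nat) < (crownMatrix.getD i []).length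
instance (differentNamesList : List Int) (territoryMatrix : List (List Int)) (crownMatrix : List (List Int)) : Decidable (Pre_GetCrownsForEachTerritory differentNamesList territoryMatrix crownMatrix) := by unfold Pre_GetCrownsForEachTerritory; infer_instance
def pvWitness_GetCrownsForEachTerritory : List Int × List (List Int) × List (List Int) := ([1, 2], [[1, 3], [2]], [[4, 5], [6]])

def Spec_GetCrownsForEachTerritory (differentNamesList : List Int) (territoryMatrix : List (List Int)) (crownMatrix : List (List Int)) (out : List Int) : Prop := out = GetCrownsForEachTerritory_alt differentNamesList territoryMatrix crownMatrix
instance (differentNamesList : List Int) (territoryMatrix : List (List Int)) (crownMatrix : List (List Int)) (out : List Int) : Decidable (Spec_GetCrownsForEachTerritory differentNamesList territoryMatrix crownMatrix out) := by unfold Spec_GetCrownsForEachTerritory; infer_instance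

-- ===== CLAIM (what is proved, stated in full; the proofs are below) =====
def Claim_equal_GetCrownsForEachTerritory : Prop := ∀ (differentNamesList : List Int) (territoryMatrix : List (List Int)) (crownMatrix : List (List Int)), Dom_GetCrownsForEachTerritory differentNamesList territoryMatrix crownMatrix → Pre_GetCrownsForEachTerritory differentNamesList territoryMatrix crownMatrix → Spec_GetCrownsForEachTerritory differentNamesList territoryMatrix crownMatrix (GetCrownsForEachTerritory differentNamesList territoryMatrix crownMatrix)
-- ===== LEMMAS AND PROOFS =====

-- sum of the crown values of the cells (territory value, crown) whose territory value is n
def cellSum (n : Int) (l : List (Int × Int)) : Int :=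
  ((l.filter (fun p => p.1 == n)).map (·.2)).sum

theorem cellSum_append (n : Int) (a b : List (Int × Int)) :
    cellSum n (a ++ b) = cellSum n a + cellSum n b := by
  simp [cellSum]

-- B's dict invariant: a fold of insert (getD + c) accumulates cellSum
theorem getD_foldl_step (l : List (Int × Int)) (d : PySem.Dict Int Int) (n : Int) :
    (l.foldl (fun d p => d.insert p.1 (d.getD p.1 0 + p.2)) d).getD n 0
      = d.getD n 0 + cellSum n l := by
  induction l generalizing d with
  | nil => simp [cellSum]
  | cons p l ih =>
    simp only [List.foldl_cons, ih]
    by_cases h : p.1 = n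
    · subst h
      simp [cellSum, PySem.Dict.getD_insert_self]
      ring
    · rw [PySem.Dict.getD_insert_of_ne _ _ _ (Ne.symm h)]
      simp [cellSum, h]

theorem getD_foldl_rows (rows : List (List Int × List Int)) (d : PySem.Dict Int Int) (n : Int) :
    (rows.foldl (fun d rr => (rr.1.zip rr.2).foldl (fun d p => d.insert p.1 (d.getD p.1 0 + p.2)) d) d).getD n 0
      = d.getD n 0 + cellSum n (rows.flatMap (fun rr => rr.1.zip rr.2)) := by
  induction rows generalizing d with
  | nil => simp [cellSum]
  | cons rr rows ih =>
    simp only [List.foldl_cons, ih, getD_foldl_step, List.flatMap_cons, cellSum_append]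
    ring

theorem alt_eq_map (differentNamesList : List Int) (territoryMatrix : List (List Int)) (crownMatrix : List (List Int)) :
    GetCrownsForEachTerritory_alt differentNamesList territoryMatrix crownMatrix
      = differentNamesList.map (fun n =>
          cellSum n ((territoryMatrix.zip crownMatrix).flatMap (fun rr => rr.1.zip rr.2))) := by
  unfold GetCrownsForEachTerritory_alt
  refine List.map_congr_left (fun n _ => ?_)
  rw [getD_foldl_rows]
  simp [PySem.Dict.getD, PySem.Dict.empty, PySem.Dict.get?]

-- A's inner loop when the whole row is out of range: every step is a no-op
theorem inner_none (crownMatrix : List (List Int)) (i : Int)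
    (h : PySem.List.pyGet? crownMatrix i = none)
    (name : Int) (rt : List Int) (j0 : Int) (cc : Int) :
    (PySem.List.enumerate rt j0).foldl (fun cc jx =>
      if jx.2 = name then
        match PySem.List.pyGet? crownMatrix i with
        | some row =>
          match PySem.List.pyGet? row jx.1 with
          | some v => if v ≠ 0 then cc + v else cc
          | none => cc
        | none => cc
      else cc) cc = cc :=
  List.foldl_fixed' (fun jx => by rw [h]; split <;> rfl) _

-- A's inner loop over one territory row equals the cellSum over the zip with the crown row suffix
theorem inner_eq (differentNamesList : List Int) (name : Int) (hname : name ∈ differentNamesList)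
    (rcfull : List Int) (rt : List Int) (j0 : Nat) (cc : Int)
    (hpre : ∀ (k : Nat) (hk : k < rt.length), rt[k] ∈ differentNamesList → j0 + k < rcfull.length) :
    (PySem.List.enumerate rt (j0 : Int)).foldl (fun cc jx =>
      if jx.2 = name then
        match PySem.List.pyGet? rcfull jx.1 with
        | some v => if v ≠ 0 then cc + v else cc
        | none => cc
      else cc) cc
    = cc + cellSum name (rt.zip (rcfull.drop j0)) := by
  induction rt generalizing j0 cc with
  | nil => simp [PySem.List.enumerate_nil, cellSum]
  | cons x rt ih =>
    rw [PySem.List.enumerate_cons]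
    simp only [List.foldl_cons]
    have hcast : (j0 : Int) + 1 = ((j0 + 1 : Nat) : Int) := by push_cast; ring
    by_cases hx : x = name
    · subst hx
      have hj0 : j0 < rcfull.length := by
        have := hpre 0 (by simp) (by simpa using hname); simpa using this
      have hdrop : rcfull.drop j0 = rcfull[j0] :: rcfull.drop (j0 + 1) :=
        List.drop_eq_getElem_cons hj0
      have hget : PySem.List.pyGet? rcfull (j0 : Int) = some rcfull[j0] := by
        rw [PySem.List.pyGet?_natCast, List.getElem?_eq_getElem hj0]
      simp only [hget]
      rw [hcast, ih (j0 + 1) _ (fun k hk hm => by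
        have := hpre (k + 1) (by simpa using hk) (by simpa using hm); omega)]
      rw [hdrop, List.zip_cons_cons]
      have hcons : cellSum x ((x, rcfull[j0]) :: rt.zip (rcfull.drop (j0 + 1)))
          = rcfull[j0] + cellSum x (rt.zip (rcfull.drop (j0 + 1))) := by
        simp only [cellSum, List.filter_cons]
        simp
      rw [hcons]
      by_cases hv : rcfull[j0] ≠ 0
      · rw [if_pos hv, if_pos trivial]; ring
      · rw [ne_eq, not_not] at hv
        rw [if_neg (show ¬rcfull[j0] ≠ 0 from fun hne => hne hv), hv, if_pos trivial]; ring
    · simp only [if_neg hx]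
      rw [hcast, ih (j0 + 1) _ (fun k hk hm => by
        have := hpre (k + 1) (by simpa using hk) (by simpa using hm); omega)]
      by_cases hj0 : j0 < rcfull.length
      · rw [List.drop_eq_getElem_cons hj0, List.zip_cons_cons]
        have hcons : cellSum name ((x, rcfull[j0]) :: rt.zip (rcfull.drop (j0 + 1)))
            = cellSum name (rt.zip (rcfull.drop (j0 + 1))) := by
          simp only [cellSum, List.filter_cons]
          simp [hx]
        rw [hcons]
      · rw [show rcfull.drop j0 = [] from List.drop_eq_nil_of_le (by omega),
            show rcfull.drop (j0 + 1) = [] from List.drop_eq_nil_of_le (by omega)]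
        simp

-- A's outer loop equals the cellSum over all covered cells (start row i0)
theorem outer_eq (differentNamesList : List Int) (crownMatrix : List (List Int))
    (name : Int) (hname : name ∈ differentNamesList)
    (tm : List (List Int)) (i0 : Nat) (cc : Int)
    (hpre : ∀ (r : Nat) (hr : r < tm.length), ∀ (k : Nat) (hk : k < tm[r].length), tm[r][k] ∈ differentNamesList →
      i0 + r < crownMatrix.length ∧ k < (crownMatrix.getD (i0 + r) []).length) :
    (PySem.List.enumerate tm (i0 : Int)).foldl (fun cc iy =>
      (PySem.List.enumerate iy.2 0).foldl (fun cc jx =>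
        if jx.2 = name then
          match PySem.List.pyGet? crownMatrix iy.1 with
          | some row =>
            match PySem.List.pyGet? row jx.1 with
            | some v => if v ≠ 0 then cc + v else cc
            | none => cc
          | none => cc
        else cc) cc) cc
    = cc + cellSum name ((tm.zip (crownMatrix.drop i0)).flatMap (fun rr => rr.1.zip rr.2)) := by
  induction tm generalizing i0 cc with
  | nil => simp [PySem.List.enumerate_nil, cellSum]
  | cons y tm ih =>
    rw [PySem.List.enumerate_cons]
    simp only [List.foldl_cons]
    have hcast : (i0 : Int) + 1 = ((i0 + 1 : Nat) : Int) := by push_cast; ring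
    have ihtail := fun cc' => ih (i0 + 1) cc' (fun r hr k hk hm => by
      have := hpre (r + 1) (by simpa using hr) k (by simpa using hk) (by simpa using hm)
      constructor
      · omega
      · have h2 := this.2
        have : i0 + 1 + r = i0 + (r + 1) := by omega
        rw [this]; exact h2)
    by_cases hi0 : i0 < crownMatrix.length
    · have hget : PySem.List.pyGet? crownMatrix (i0 : Int) = some crownMatrix[i0] := by
        rw [PySem.List.pyGet?_natCast, List.getElem?_eq_getElem hi0]
      have hdropc : crownMatrix.drop i0 = crownMatrix[i0] :: crownMatrix.drop (i0 + 1) :=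
        List.drop_eq_getElem_cons hi0
      rw [show ((PySem.List.enumerate y 0).foldl (fun cc jx =>
          if jx.2 = name then
            match PySem.List.pyGet? crownMatrix (i0 : Int) with
            | some row =>
              match PySem.List.pyGet? row jx.1 with
              | some v => if v ≠ 0 then cc + v else cc
              | none => cc
            | none => cc
          else cc) cc)
        = cc + cellSum name (y.zip crownMatrix[i0]) from ?_]
      · rw [hcast, ihtail]
        rw [hdropc]
        simp only [List.zip_cons_cons, List.flatMap_cons, cellSum_append]
        ring
      · simp only [hget]
        have := inner_eq differentNamesList name hname crownMatrix[i0] y 0 cc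
          (fun k hk hm => by
            have := (hpre 0 (by simp) k (by simpa using hk) (by simpa using hm)).2
            simpa [List.getD_eq_getElem?_getD, hi0] using this)
        simpa using this
    · have hgetn : PySem.List.pyGet? crownMatrix (i0 : Int) = none := by
        rw [PySem.List.pyGet?_natCast, List.getElem?_eq_none (by omega)]
      rw [inner_none crownMatrix (i0 : Int) hgetn]
      rw [hcast, ihtail]
      have h1 : crownMatrix.drop i0 = [] := List.drop_eq_nil_of_le (by omega)
      have h2 : crownMatrix.drop (i0 + 1) = [] := List.drop_eq_nil_of_le (by omega)
      simp [h1, h2]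

-- ===== VERDICT (by name: the statement is the Claim_ definition above) =====
theorem GetCrownsForEachTerritory_spec : Claim_equal_GetCrownsForEachTerritory := by
  intro names tm cm _ hpre
  show _ = _
  rw [alt_eq_map]
  unfold GetCrownsForEachTerritory
  rw [PySem.List.foldl_append_singleton_eq_map]
  refine List.map_congr_left (fun name hname => ?_)
  have hpre' : ∀ (r : Nat) (hr : r < tm.length), ∀ (k : Nat) (hk : k < tm[r].length), tm[r][k] ∈ names →
      0 + r < cm.length ∧ k < (cm.getD (0 + r) []).length := by
    intro r hr k hk hm
    have := hpre ⟨r, hr⟩ ⟨k, by simpa using hk⟩ (by simpa using hm)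
    simpa using this
  have := outer_eq names cm name hname tm 0 0 hpre'
  simpa using this
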